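-- pv_equiv track=rewrite | github.com/RishabhMathur06/Data-Structures-and-Algorithms | GeeksforGeeks POTD/Maximum index.py | findMaximumDiff
-- ===== SOURCE A (Python) =====
-- def findMaximumDiff(a, n):
--     i = 0
--     j = n-1
--
--     maxm = 0
--
--     while(i < n and j > -1 and i <=j):
--             if(a[i] <= a[j]):
--                 maxm = max(maxm, j-i)
--                 i += 1
--                 j = n-1
--
--             else:
--                 j -= 1
--
--     return maxm
-- ===== SOURCE B (Python) =====
-- def findMaximumDiff(a, n):
--     # O(n): prefix-min / suffix-max arrays + one merge traversal
--     if n <= 0: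
--         return 0
--     left_min = []
--     cur = a[0]
--     for k in range(n):
--         cur = min(cur, a[k])
--         left_min.append(cur)
--     right_max = []
--     cur = a[n - 1]
--     for k in range(n):
--         cur = max(cur, a[n - 1 - k])
--         right_max.append(cur)
--     right_max.reverse()
--     i = 0
--     j = 0
--     maxm = 0
--     while i < n and j < n:
--         if left_min[i] <= right_max[j]:
--             maxm = max(maxm, j - i)
--             j += 1
--         else:
--             i += 1
--     return maxm
-- ===== Notes on version B (the rewrite author's own statement) =====
-- stated objective: faster
-- what changed: replaced the quadratic two-pointer loop that rescans j from n-1 for every i with precomputed prefix-min and suffix-max arrays merged in a single linear traversal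
import Mathlib
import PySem

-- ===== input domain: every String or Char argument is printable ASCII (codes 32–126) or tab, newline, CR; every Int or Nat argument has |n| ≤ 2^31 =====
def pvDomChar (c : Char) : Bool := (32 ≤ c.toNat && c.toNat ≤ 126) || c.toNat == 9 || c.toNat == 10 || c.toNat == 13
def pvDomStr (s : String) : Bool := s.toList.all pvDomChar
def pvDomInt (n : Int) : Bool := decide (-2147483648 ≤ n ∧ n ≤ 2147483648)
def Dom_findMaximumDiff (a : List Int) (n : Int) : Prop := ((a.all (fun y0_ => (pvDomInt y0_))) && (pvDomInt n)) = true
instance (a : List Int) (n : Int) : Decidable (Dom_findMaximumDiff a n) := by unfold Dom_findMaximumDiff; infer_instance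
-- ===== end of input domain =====

-- B replaces A's quadratic rescanning two-pointer with prefix-min/suffix-max
-- arrays and one linear merge traversal (objective: faster, asymptotic).

-- ===== PORT A =====
-- the while loop of A; pyGetD's default is unreachable under Pre_ (0 ≤ index < n ≤ len a)
def fmdLoopA (a : List Int) (n i j maxm : Int) : Int :=
  if h : i < n ∧ -1 < j ∧ i ≤ j then
    if PySem.List.pyGetD a i 0 ≤ PySem.List.pyGetD a j 0 then
      fmdLoopA a n (i + 1) (n - 1) (max maxm (j - i))
    else
      fmdLoopA a n i (j - 1) maxm
  else maxm
termination_by ((n - i).toNat, (j + 1).toNat)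
decreasing_by
  · exact Prod.Lex.left _ _ (by omega)
  · exact Prod.Lex.right _ (by omega)

def findMaximumDiff (a : List Int) (n : Int) : Int :=
  fmdLoopA a n 0 (n - 1) 0

-- ===== PORT B =====
-- the 'for k in range(n)' building left_min (running cur, appended each step)
def fmdLeftMin (a : List Int) (n : Int) : List Int :=
  ((PySem.List.pyRange 0 n 1).foldl
    (fun st k =>
      let c := min st.1 (PySem.List.pyGetD a k 0)
      (c, st.2 ++ [c]))
    (PySem.List.pyGetD a 0 0, [])).2

-- the 'for k in range(n)' building right_max, followed by right_max.reverse()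
def fmdRightMax (a : List Int) (n : Int) : List Int :=
  (((PySem.List.pyRange 0 n 1).foldl
    (fun st k =>
      let c := max st.1 (PySem.List.pyGetD a (n - 1 - k) 0)
      (c, st.2 ++ [c]))
    (PySem.List.pyGetD a (n - 1) 0, [])).2).reverse

-- the merge 'while i < n and j < n' loop
def fmdMerge (lm rm : List Int) (n i j maxm : Int) : Int :=
  if h : i < n ∧ j < n then
    if PySem.List.pyGetD lm i 0 ≤ PySem.List.pyGetD rm j 0 then
      fmdMerge lm rm n i (j + 1) (max maxm (j - i))
    else
      fmdMerge lm rm n (i + 1) j maxm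
  else maxm
termination_by ((n - i) + (n - j)).toNat
decreasing_by
  · omega
  · omega

def findMaximumDiff_alt (a : List Int) (n : Int) : Int :=
  if n ≤ 0 then 0
  else fmdMerge (fmdLeftMin a n) (fmdRightMax a n) n 0 0 0

-- ===== PRECONDITION & SPEC =====
-- Pre_ excludes exactly the inputs where Python A raises IndexError: n > len(a)
def Pre_findMaximumDiff (a : List Int) (n : Int) : Prop := n ≤ (a.length : Int)
instance (a : List Int) (n : Int) : Decidable (Pre_findMaximumDiff a n) := by
  unfold Pre_findMaximumDiff; infer_instance

def pvWitness_findMaximumDiff : List Int × Int := ([3, 1, 4, 1, 5], 5)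

def Spec_findMaximumDiff (a : List Int) (n : Int) (out : Int) : Prop := out = findMaximumDiff_alt a n
instance (a : List Int) (n : Int) (out : Int) : Decidable (Spec_findMaximumDiff a n out) := by unfold Spec_findMaximumDiff; infer_instance

-- ===== CLAIM (what is proved, stated in full; the proofs are below) =====
def Claim_equal_findMaximumDiff : Prop := ∀ (a : List Int) (n : Int), Dom_findMaximumDiff a n → Pre_findMaximumDiff a n → Spec_findMaximumDiff a n (findMaximumDiff a n)

-- ===== LEMMAS AND PROOFS =====

-- shorthand for the Python read a[i] (in range under the invariants used below)
def fmdG (a : List Int) (i : Int) : Int := PySem.List.pyGetD a i 0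

-- a valid pair: 0 ≤ i ≤ j < n with a[i] ≤ a[j]
def fmdVP (a : List Int) (n i j : Int) : Prop :=
  0 ≤ i ∧ i ≤ j ∧ j < n ∧ fmdG a i ≤ fmdG a j

-- characterisation of the answer: a nonnegative upper bound of all valid
-- differences that is 0 or dominated by some valid difference
def fmdBest (a : List Int) (n r : Int) : Prop :=
  0 ≤ r ∧ (r = 0 ∨ ∃ i j, fmdVP a n i j ∧ r ≤ j - i) ∧
    ∀ i j, fmdVP a n i j → j - i ≤ r

theorem fmdBest_unique {a : List Int} {n r s : Int}
    (hr : fmdBest a n r) (hs : fmdBest a n s) : r = s := by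
  obtain ⟨hr0, hratt, hrub⟩ := hr
  obtain ⟨hs0, hsatt, hsub⟩ := hs
  have h1 : r ≤ s := by
    rcases hratt with h | ⟨i, j, hvp, hle⟩
    · omega
    · have := hsub i j hvp; omega
  have h2 : s ≤ r := by
    rcases hsatt with h | ⟨i, j, hvp, hle⟩
    · omega
    · have := hrub i j hvp; omega
  omega

-- ===== A side =====

theorem fmdLoopA_best (a : List Int) (n i j m : Int)
    (h0 : 0 ≤ i) (hjn : j ≤ n - 1) (hm : 0 ≤ m)
    (hatt : m = 0 ∨ ∃ p q, fmdVP a n p q ∧ m ≤ q - p)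
    (hub : ∀ p q, fmdVP a n p q → p < i → q - p ≤ m)
    (hscan : ∀ q, j < q → q < n → ¬ fmdG a i ≤ fmdG a q)
    (hij : i < n → i ≤ j) :
    fmdBest a n (fmdLoopA a n i j m) := by
  fun_induction fmdLoopA a n i j m with
  | case1 i j m h hle ih =>
    apply ih
    · omega
    · omega
    · omega
    · -- attainment for max m (j - i)
      rcases le_or_gt m (j - i) with hc | hc
      · right
        exact ⟨i, j, ⟨h0, h.2.2, by omega, hle⟩, by omega⟩
      · rcases hatt with h' | ⟨p, q, hvp, hle'⟩
        · left; omega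
        · right; exact ⟨p, q, hvp, by omega⟩
    · intro p q hvp hpi
      by_cases hpi' : p < i
      · have := hub p q hvp hpi'; omega
      · have hp : p = i := by omega
        subst hp
        by_cases hq : q ≤ j
        · omega
        · exact absurd hvp.2.2.2 (hscan q (by omega) hvp.2.2.1)
    · intro q h1 h2; omega
    · intro h'; omega
  | case2 i j m h hle ih =>
    apply ih h0 (by omega) hm hatt hub
    · intro q h1 h2
      by_cases hq : q = j
      · subst hq; exact hle
      · exact hscan q (by omega) h2
    · intro h'
      have : i ≠ j := by
        intro he; subst he; exact hle le_rfl
      omega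
  | case3 i j m h =>
    refine ⟨hm, hatt, ?_⟩
    intro p q hvp
    have hq0 := hvp.1
    have hpq := hvp.2.1
    have hqn := hvp.2.2.1
    by_cases hin : i < n
    · exfalso
      have := hij hin
      omega
    · exact hub p q hvp (by omega)

theorem findMaximumDiff_best (a : List Int) (n : Int) :
    fmdBest a n (findMaximumDiff a n) := by
  unfold findMaximumDiff
  apply fmdLoopA_best
  · exact le_rfl
  · omega
  · exact le_rfl
  · left; rfl
  · intro p q hvp hp; exact absurd hvp.1 (by omega)
  · intro q h1 h2; omega
  · intro h; omega

-- ===== B side =====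

-- running-accumulation value after k+1 loop iterations
def fmdChain (f : Int → Int → Int) (c0 : Int) (v : Int → Int) : Nat → Int
  | 0 => f c0 (v 0)
  | k + 1 => f (fmdChain f c0 v k) (v (k + 1))

theorem fmdChain_fold (f : Int → Int → Int) (c0 : Int) (v : Int → Int) (N : Nat) :
    (PySem.List.pyRange 0 ((N : Int) + 1) 1).foldl
        (fun st k =>
          let c := f st.1 (v k)
          (c, st.2 ++ [c])) (c0, [])
      = (fmdChain f c0 (fun k => v (k : Int)) N,
         (List.range (N + 1)).map (fun k => fmdChain f c0 (fun k => v (k : Int)) k)) := by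
  induction N with
  | zero =>
    rw [show ((0 : Nat) : Int) + 1 = 0 + 1 from by norm_num, PySem.List.pyRange_one_singleton]
    simp [fmdChain]
  | succ N ih =>
    rw [show ((N + 1 : Nat) : Int) + 1 = ((N : Int) + 1) + 1 from by push_cast; ring,
        PySem.List.pyRange_one_succ_right (by omega), List.foldl_append, ih]
    rw [show ((N : Int) + 1) = ((N + 1 : Nat) : Int) from by push_cast; ring]
    simp [fmdChain, List.range_succ (n := N + 1)]

theorem fmdChain_min_le (c0 : Int) (v : Int → Int) (k p : Nat) (hp : p ≤ k) :
    fmdChain min c0 v k ≤ v p := by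
  induction k with
  | zero =>
    have : p = 0 := by omega
    subst this; simp [fmdChain]
  | succ k ih =>
    by_cases h : p = k + 1
    · subst h; simp [fmdChain]
    · have := ih (by omega)
      simp only [fmdChain]
      exact le_trans (min_le_left _ _) this

theorem fmdChain_min_att (v : Int → Int) (k : Nat) :
    ∃ p, p ≤ k ∧ fmdChain min (v 0) v k = v p := by
  induction k with
  | zero => exact ⟨0, le_rfl, by simp [fmdChain]⟩
  | succ k ih =>
    obtain ⟨p, hp, he⟩ := ih
    rcases min_cases (fmdChain min (v 0) v k) (v (k + 1)) with ⟨h1, _⟩ | ⟨h1, _⟩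
    · exact ⟨p, by omega, by simp only [fmdChain]; rw [h1, he]⟩
    · exact ⟨k + 1, le_rfl, by simp only [fmdChain]; rw [h1]; norm_num⟩

theorem fmdChain_max_att (v : Int → Int) (k : Nat) :
    ∃ q, q ≤ k ∧ fmdChain max (v 0) v k = v q := by
  induction k with
  | zero => exact ⟨0, le_rfl, by simp [fmdChain]⟩
  | succ k ih =>
    obtain ⟨p, hp, he⟩ := ih
    rcases max_cases (fmdChain max (v 0) v k) (v (k + 1)) with ⟨h1, _⟩ | ⟨h1, _⟩
    · exact ⟨p, by omega, by simp only [fmdChain]; rw [h1, he]⟩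
    · exact ⟨k + 1, le_rfl, by simp only [fmdChain]; rw [h1]; norm_num⟩

theorem fmdChain_max_ge (c0 : Int) (v : Int → Int) (k p : Nat) (hp : p ≤ k) :
    v p ≤ fmdChain max c0 v k := by
  induction k with
  | zero =>
    have : p = 0 := by omega
    subst this; simp [fmdChain]
  | succ k ih =>
    by_cases h : p = k + 1
    · subst h; simp [fmdChain]
    · have := ih (by omega)
      simp only [fmdChain]
      exact le_trans this (le_max_left _ _)

-- merge-loop invariant proof, abstract in the two arrays
theorem fmdMerge_best (a : List Int) (n : Int) (lm rm : List Int) (i j m : Int)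
    (HL1 : ∀ i : Int, 0 ≤ i → i < n → ∃ p, 0 ≤ p ∧ p ≤ i ∧ PySem.List.pyGetD lm i 0 = fmdG a p)
    (HL2 : ∀ i p : Int, 0 ≤ p → p ≤ i → i < n → PySem.List.pyGetD lm i 0 ≤ fmdG a p)
    (HR1 : ∀ j : Int, 0 ≤ j → j < n → ∃ q, j ≤ q ∧ q < n ∧ PySem.List.pyGetD rm j 0 = fmdG a q)
    (HR2 : ∀ j q : Int, 0 ≤ j → j ≤ q → q < n → fmdG a q ≤ PySem.List.pyGetD rm j 0)
    (h0 : 0 ≤ i) (hij : i ≤ j) (hm : 0 ≤ m)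
    (hatt : m = 0 ∨ ∃ p q, fmdVP a n p q ∧ m ≤ q - p)
    (B1 : ∀ p q, 0 ≤ p → p ≤ q → q < n → PySem.List.pyGetD lm p 0 ≤ PySem.List.pyGetD rm q 0 →
      p < i → q - p ≤ m)
    (B2 : ∀ p q, 0 ≤ p → p ≤ q → q < n → PySem.List.pyGetD lm p 0 ≤ PySem.List.pyGetD rm q 0 →
      i ≤ p → q < j → q - p ≤ m) :
    fmdBest a n (fmdMerge lm rm n i j m) := by
  fun_induction fmdMerge lm rm n i j m with
  | case1 i j m h hle ih =>
    apply ih h0 (by omega)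
    · omega
    · -- attainment for max m (j - i)
      obtain ⟨p, hp0, hpi, hpe⟩ := HL1 i h0 h.1
      obtain ⟨q, hjq, hqn, hqe⟩ := HR1 j (by omega) h.2
      have hvp : fmdVP a n p q := ⟨hp0, by omega, hqn, by rw [← hpe, ← hqe]; exact hle⟩
      rcases le_or_gt m (j - i) with hc | hc
      · right; exact ⟨p, q, hvp, by omega⟩
      · rcases hatt with h' | ⟨p', q', hvp', hle'⟩
        · left; omega
        · right; exact ⟨p', q', hvp', by omega⟩
    · exact fun p q a1 a2 a3 a4 a5 => le_trans (B1 p q a1 a2 a3 a4 a5) (le_max_left _ _)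
    · intro p q hp0 hpq hqn hgd hip hqj
      by_cases hq : q < j
      · exact le_trans (B2 p q hp0 hpq hqn hgd hip hq) (le_max_left _ _)
      · have hq' : q - p ≤ j - i := by omega
        exact le_trans hq' (le_max_right _ _)
  | case2 i j m h hle ih =>
    have hine : i ≠ j := by
      intro he; subst he
      exact hle (le_trans (HL2 i i h0 le_rfl h.1) (HR2 i i h0 le_rfl h.1))
    apply ih (by omega) (by omega) hm hatt
    · intro p q hp0 hpq hqn hgd hpi
      by_cases hp : p < i
      · exact B1 p q hp0 hpq hqn hgd hp
      · have hpe : p = i := by omega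
        subst hpe
        by_cases hq : q < j
        · exact B2 p q hp0 hpq hqn hgd le_rfl hq
        · exfalso
          -- rm is nonincreasing: rm[q] ≤ rm[j] < lm[i], contradicting goodness
          obtain ⟨q', hqq', hq'n, hq'e⟩ := HR1 q (by omega) hqn
          have h1 : fmdG a q' ≤ PySem.List.pyGetD rm j 0 := HR2 j q' (by omega) (by omega) hq'n
          rw [← hq'e] at h1
          exact hle (le_trans hgd h1)
    · intro p q hp0 hpq hqn hgd hip hqj
      exact B2 p q hp0 hpq hqn hgd (by omega) hqj
  | case3 i j m h =>
    refine ⟨hm, hatt, ?_⟩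
    intro p q hvp
    obtain ⟨hp0, hpq, hqn, hg⟩ := hvp
    have hgd : PySem.List.pyGetD lm p 0 ≤ PySem.List.pyGetD rm q 0 :=
      le_trans (HL2 p p hp0 le_rfl (by omega)) (le_trans hg (HR2 q q (by omega) le_rfl hqn))
    by_cases hin : i < n
    · have hjn : ¬ j < n := by tauto
      by_cases hp : p < i
      · exact B1 p q hp0 hpq hqn hgd hp
      · exact B2 p q hp0 hpq hqn hgd (by omega) (by omega)
    · exact B1 p q hp0 hpq hqn hgd (by omega)

-- the built left_min list, characterised
theorem fmdLeftMin_eq (a : List Int) (n : Int) (hn : 0 < n) :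
    fmdLeftMin a n = (List.range n.toNat).map
      (fun k => fmdChain min (PySem.List.pyGetD a 0 0)
        (fun t => PySem.List.pyGetD a (t : Int) 0) k) := by
  have hN : n = ((n.toNat - 1 : Nat) : Int) + 1 := by omega
  have hN2 : n.toNat - 1 + 1 = n.toNat := by omega
  unfold fmdLeftMin
  rw [hN, fmdChain_fold min (PySem.List.pyGetD a 0 0)
    (fun t => PySem.List.pyGetD a t 0) (n.toNat - 1)]
  rw [show ((((n.toNat - 1 : Nat) : Int) + 1).toNat) = n.toNat from by omega, hN2]

theorem fmdRightMax_eq (a : List Int) (n : Int) (hn : 0 < n) :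
    fmdRightMax a n = ((List.range n.toNat).map
      (fun k => fmdChain max (PySem.List.pyGetD a (n - 1) 0)
        (fun t => PySem.List.pyGetD a (n - 1 - (t : Int)) 0) k)).reverse := by
  have hN : n = ((n.toNat - 1 : Nat) : Int) + 1 := by omega
  have hN2 : n.toNat - 1 + 1 = n.toNat := by omega
  unfold fmdRightMax
  rw [hN, fmdChain_fold max (PySem.List.pyGetD a (((n.toNat - 1 : Nat) : Int) + 1 - 1) 0)
    (fun t => PySem.List.pyGetD a (((n.toNat - 1 : Nat) : Int) + 1 - 1 - t) 0) (n.toNat - 1)]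
  have he : (((n.toNat - 1 : Nat) : Int) + 1 - 1) = n - 1 := by omega
  rw [he, show ((((n.toNat - 1 : Nat) : Int) + 1).toNat) = n.toNat from by omega, hN2]

theorem fmdLeftMin_get (a : List Int) (n i : Int) (h0 : 0 ≤ i) (hi : i < n) :
    PySem.List.pyGetD (fmdLeftMin a n) i 0
      = fmdChain min (PySem.List.pyGetD a 0 0)
          (fun t => PySem.List.pyGetD a (t : Int) 0) i.toNat := by
  rw [fmdLeftMin_eq a n (by omega)]
  have hlen : i < (((List.range n.toNat).map
      (fun k => fmdChain min (PySem.List.pyGetD a 0 0)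
        (fun t => PySem.List.pyGetD a (t : Int) 0) k)).length : Int) := by
    simp; omega
  rw [PySem.List.pyGetD_eq_getElem _ 0 h0 hlen]
  simp

theorem fmdRightMax_get (a : List Int) (n j : Int) (h0 : 0 ≤ j) (hj : j < n) :
    PySem.List.pyGetD (fmdRightMax a n) j 0
      = fmdChain max (PySem.List.pyGetD a (n - 1) 0)
          (fun t => PySem.List.pyGetD a (n - 1 - (t : Int)) 0) (n.toNat - 1 - j.toNat) := by
  rw [fmdRightMax_eq a n (by omega)]
  have hlen : j < ((((List.range n.toNat).map
      (fun k => fmdChain max (PySem.List.pyGetD a (n - 1) 0)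
        (fun t => PySem.List.pyGetD a (n - 1 - (t : Int)) 0) k)).reverse).length : Int) := by
    simp; omega
  rw [PySem.List.pyGetD_eq_getElem _ 0 h0 hlen]
  rw [List.getElem_reverse]
  simp

-- the initial cur of each building loop is its own k = 0 read
theorem fmdLM_c0 (a : List Int) :
    PySem.List.pyGetD a 0 0 = (fun t : Int => PySem.List.pyGetD a t 0) 0 := rfl

theorem fmdRM_c0 (a : List Int) (n : Int) :
    PySem.List.pyGetD a (n - 1) 0
      = (fun t : Int => PySem.List.pyGetD a (n - 1 - t) 0) 0 := by norm_num

theorem findMaximumDiff_alt_best (a : List Int) (n : Int) :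
    fmdBest a n (findMaximumDiff_alt a n) := by
  unfold findMaximumDiff_alt
  by_cases hn : n ≤ 0
  · rw [if_pos hn]
    refine ⟨le_rfl, Or.inl rfl, ?_⟩
    intro p q hvp
    exact absurd hvp.2.2.1 (by have := hvp.1; have := hvp.2.1; omega)
  · rw [if_neg hn]
    apply fmdMerge_best
    · -- HL1: left_min[i] is attained at some p ≤ i
      intro i h0 hi
      rw [fmdLeftMin_get a n i h0 hi, fmdLM_c0 a]
      obtain ⟨p, hp, he⟩ := fmdChain_min_att (fun t : Int => PySem.List.pyGetD a (t : Int) 0) i.toNat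
      exact ⟨(p : Int), by omega, by omega, he⟩
    · -- HL2: left_min[i] ≤ a[p] for 0 ≤ p ≤ i
      intro i p hp0 hpi hi
      rw [fmdLeftMin_get a n i (by omega) hi, fmdLM_c0 a]
      have := fmdChain_min_le ((fun t : Int => PySem.List.pyGetD a (t : Int) 0) 0)
        (fun t : Int => PySem.List.pyGetD a (t : Int) 0) i.toNat p.toNat (by omega)
      simpa [fmdG, Int.toNat_of_nonneg hp0] using this
    · -- HR1: right_max[j] is attained at some q with j ≤ q < n
      intro j h0 hj
      rw [fmdRightMax_get a n j h0 hj, fmdRM_c0 a n]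
      obtain ⟨k, hk, he⟩ := fmdChain_max_att
        (fun t : Int => PySem.List.pyGetD a (n - 1 - (t : Int)) 0) (n.toNat - 1 - j.toNat)
      refine ⟨n - 1 - (k : Int), by omega, by omega, ?_⟩
      rw [he]
      rfl
    · -- HR2: a[q] ≤ right_max[j] for j ≤ q < n
      intro j q h0 hjq hq
      rw [fmdRightMax_get a n j h0 (by omega), fmdRM_c0 a n]
      have := fmdChain_max_ge ((fun t : Int => PySem.List.pyGetD a (n - 1 - (t : Int)) 0) 0)
        (fun t : Int => PySem.List.pyGetD a (n - 1 - (t : Int)) 0)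
        (n.toNat - 1 - j.toNat) ((n - 1 - q).toNat) (by omega)
      have hcast : (((n - 1 - q).toNat : Nat) : Int) = n - 1 - q :=
        Int.toNat_of_nonneg (by omega)
      simp only [hcast] at this
      have h2 : n - 1 - (n - 1 - q) = q := by ring
      simpa [fmdG, h2] using this
    · exact le_rfl
    · exact le_rfl
    · exact le_rfl
    · exact Or.inl rfl
    · intro p q hp0 _ _ _ hpi; omega
    · intro p q hp0 hpq _ _ _ hqj; omega

-- ===== VERDICT (by name: the statement is the Claim_ definition above) =====
theorem findMaximumDiff_spec : Claim_equal_findMaximumDiff := by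
  intro a n _ _
  unfold Spec_findMaximumDiff
  exact fmdBest_unique (findMaximumDiff_best a n) (findMaximumDiff_alt_best a n)
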